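-- pv_equiv track=rewrite | github.com/ellalouwenaar/BEHRT2 | added_by_me/dataLoaderBERHT.py | _create_segment_ids
-- ===== SOURCE A (Python) =====
-- def _create_segment_ids(codes):
--     """Wissel tussen 0 en 1 voor elke SEP"""
--     segment_ids = []
--     current_segment = 0
--     for code in codes:
--         segment_ids.append(current_segment)
--         if code == 'SEP':
--             current_segment = 1 - current_segment
--     return segment_ids
-- ===== SOURCE B (Python) =====
-- def _create_segment_ids(codes):
--     # Block-run emission: instead of carrying a per-token toggle, repeatedly
--     # cut the list at the next 'SEP' and append a whole constant run for the
--     # block (block k gets id k % 2) by list repetition.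
--     out = []
--     k = 0
--     rest = codes
--     while 'SEP' in rest:
--         i = rest.index('SEP')
--         out += [k % 2] * (i + 1)
--         rest = rest[i + 1:]
--         k += 1
--     out += [k % 2] * len(rest)
--     return out
-- ===== Notes on version B (the rewrite author's own statement) =====
-- stated objective: alternative
-- what changed: Replaces the per-token toggle loop by block-run emission: cut at each next 'SEP' with index/slice and append a whole constant run [k % 2] * block_length per block.
import Mathlib
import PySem

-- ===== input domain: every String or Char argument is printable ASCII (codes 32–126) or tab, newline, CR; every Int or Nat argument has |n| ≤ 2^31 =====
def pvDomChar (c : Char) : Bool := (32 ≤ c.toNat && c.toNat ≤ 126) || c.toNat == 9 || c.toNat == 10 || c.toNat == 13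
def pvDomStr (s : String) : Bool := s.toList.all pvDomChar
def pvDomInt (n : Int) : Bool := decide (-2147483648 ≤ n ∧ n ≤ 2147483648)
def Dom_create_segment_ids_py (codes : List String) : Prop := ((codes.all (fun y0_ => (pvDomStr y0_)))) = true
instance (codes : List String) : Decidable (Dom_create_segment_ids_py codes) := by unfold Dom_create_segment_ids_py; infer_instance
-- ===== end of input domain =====

-- B replaces A's per-token toggle loop by block-run emission: cut at each next 'SEP'
-- and append a whole constant run per block (objective: alternative decomposition).

-- ===== PORT A =====
def create_segment_ids_py (codes : List String) : List Int :=
  -- segment_ids = []; current_segment = 0; for code in codes: append, toggle on 'SEP'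
  (codes.foldl (fun (st : List Int × Int) code =>
      let segment_ids := st.1 ++ [st.2]
      let current_segment := if code = "SEP" then 1 - st.2 else st.2
      (segment_ids, current_segment)) ([], 0)).1

-- ===== PORT B =====
-- Source B's while loop: state (out, k, rest); the guard `'SEP' in rest` together with
-- `rest.index('SEP')` is index? (some = found, none = not in rest, the loop exit).
-- `[k % 2] * m` is List.replicate m ((k : Int) % 2) (k ≥ 0, so Python % = Int.emod here).
def altLoop (out : List Int) (k : Nat) (rest : List String) : List Int :=
  match h : PySem.List.index? rest "SEP" with
  | some i =>
      -- out += [k % 2] * (i + 1); rest = rest[i+1:]; k += 1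
      altLoop (out ++ List.replicate (i + 1) ((k : Int) % 2)) (k + 1)
        (PySem.List.slice rest (some ((i : Int) + 1)) none)
  | none => out ++ List.replicate rest.length ((k : Int) % 2)
termination_by rest.length
decreasing_by
  have hmem : "SEP" ∈ rest := (PySem.List.index?_isSome_iff rest "SEP").mp (by rw [h]; rfl)
  have : 0 < rest.length := List.length_pos_of_mem hmem
  rw [show ((i : Int) + 1) = (((i + 1 : Nat) : Int)) by push_cast; ring,
      PySem.List.slice_from_natCast]
  simp [List.length_drop]; omega

def create_segment_ids_py_alt (codes : List String) : List Int :=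
  altLoop [] 0 codes

-- ===== PRECONDITION & SPEC =====
def Spec_create_segment_ids_py (codes : List String) (out : List Int) : Prop := out = create_segment_ids_py_alt codes
instance (codes : List String) (out : List Int) : Decidable (Spec_create_segment_ids_py codes out) := by unfold Spec_create_segment_ids_py; infer_instance

-- ===== CLAIM (what is proved, stated in full; the proofs are below) =====
def Claim_equal_create_segment_ids_py : Prop := ∀ (codes : List String), Dom_create_segment_ids_py codes → Spec_create_segment_ids_py codes (create_segment_ids_py codes)

-- ===== LEMMAS AND PROOFS =====

/-- A's loop, recursively: output of the remaining iterations given current segment. -/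
def segA : List String → Int → List Int
  | [], _ => []
  | c :: cs, cur => cur :: segA cs (if c = "SEP" then 1 - cur else cur)

theorem foldA_spec (cs : List String) (acc : List Int) (cur : Int) :
    (cs.foldl (fun (st : List Int × Int) code =>
      ((st.1 ++ [st.2]), if code = "SEP" then 1 - st.2 else st.2)) (acc, cur)).1
      = acc ++ segA cs cur := by
  induction cs generalizing acc cur with
  | nil => simp [segA]
  | cons c cs ih => simp [segA, ih]

/-- Without any 'SEP', A's loop emits a constant run. -/
theorem segA_no_sep (cs : List String) (cur : Int) (h : "SEP" ∉ cs) :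
    segA cs cur = List.replicate cs.length cur := by
  induction cs with
  | nil => simp [segA]
  | cons c cs ih =>
    have hc : ¬ c = "SEP" := fun hc => h (hc ▸ List.mem_cons_self)
    simp only [segA, if_neg hc, List.length_cons, List.replicate_succ]
    exact congrArg _ (ih (fun hm => h (List.mem_cons_of_mem _ hm)))

/-- Splitting A's loop at the first 'SEP'. -/
theorem segA_split (pre suf : List String) (cur : Int) (h : "SEP" ∉ pre) :
    segA (pre ++ "SEP" :: suf) cur
      = List.replicate (pre.length + 1) cur ++ segA suf (1 - cur) := by
  induction pre with
  | nil => simp [segA]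
  | cons c cs ih =>
    have hc : ¬ c = "SEP" := fun hc => h (hc ▸ List.mem_cons_self)
    simp only [List.cons_append, segA, if_neg hc, List.length_cons, List.replicate_succ,
      List.cons_append]
    exact congrArg _ (ih (fun hm => h (List.mem_cons_of_mem _ hm)))

theorem emod_two_succ (k : Nat) : (((k + 1 : Nat) : Int)) % 2 = 1 - (k : Int) % 2 := by
  push_cast
  omega

/-- B's loop equals A's remaining output with current segment k % 2. -/
theorem altLoop_spec (rest : List String) (out : List Int) (k : Nat) :
    altLoop out k rest = out ++ segA rest ((k : Int) % 2) := by
  induction hn : rest.length using Nat.strong_induction_on generalizing rest out k with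
  | _ n ih =>
  rw [altLoop]
  split
  next i h =>
    obtain ⟨pre, suf, hcat, hlen, hnot⟩ := (PySem.List.index?_eq_some_iff rest "SEP" i).mp h
    have hdrop : PySem.List.slice rest (some ((i : Int) + 1)) none = suf := by
      rw [show ((i : Int) + 1) = (((i + 1 : Nat) : Int)) by push_cast; ring,
        PySem.List.slice_from_natCast, hcat, ← hlen]
      simp
    have hslen : suf.length < n := by
      subst hn; rw [hcat]; simp; omega
    rw [hdrop, ih suf.length hslen suf _ (k + 1) rfl, hcat, segA_split pre suf _ hnot,
      hlen, emod_two_succ]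
    simp
  next h =>
    have hnot : "SEP" ∉ rest := (PySem.List.index?_eq_none_iff rest "SEP").mp h
    rw [segA_no_sep rest _ hnot]

theorem create_segment_ids_py_eq (codes : List String) :
    create_segment_ids_py codes = create_segment_ids_py_alt codes := by
  show (codes.foldl (fun (st : List Int × Int) code =>
      ((st.1 ++ [st.2]), if code = "SEP" then 1 - st.2 else st.2)) ([], 0)).1
    = altLoop [] 0 codes
  rw [foldA_spec, altLoop_spec]
  norm_num

-- ===== VERDICT (by name: the statement is the Claim_ definition above) =====
theorem create_segment_ids_py_spec : Claim_equal_create_segment_ids_py := by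
  intro codes _
  unfold Spec_create_segment_ids_py
  exact create_segment_ids_py_eq codes
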